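-- pv_equiv track=rewrite | github.com/de2425c/poker_backend | scripts/seed_hu_preflop.py | get_preflop_bucket
-- ===== SOURCE A (Python) =====
-- from typing import Dict, List, Tuple, Any
--
-- def get_preflop_bucket(hole_cards: Tuple[int, int]) -> int:
--     """Get preflop hand bucket (0-168 for 169 canonical preflop hands).
--
--     Matches the legacy formula in abstract_mccfr.py for compatibility.
--     """
--     c1, c2 = hole_cards
--     r1, s1 = c1 // 4, c1 % 4
--     r2, s2 = c2 // 4, c2 % 4
--
--     # Ensure higher rank is first
--     if r1 < r2:
--         r1, r2 = r2, r1
--         s1, s2 = s2, s1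
--
--     is_suited = (s1 == s2)
--
--     if r1 == r2:
--         # Pairs: 0-12 (22=0, 33=1, ..., AA=12)
--         return r1
--     elif is_suited:
--         # Suited: legacy loop formula
--         idx = 13
--         for hi in range(12, r1, -1):
--             idx += hi
--         idx += (r1 - 1 - r2)
--         return min(idx, 168)
--     else:
--         # Offsuit: legacy loop formula
--         idx = 13 + 78  # 13 pairs + 78 suited
--         for hi in range(12, r1, -1):
--             idx += hi
--         idx += (r1 - 1 - r2)
--         return min(idx, 168)
-- ===== SOURCE B (Python) =====
-- def get_preflop_bucket(hole_cards):
--     """Closed-form bucket: same normalization, but the legacy countdown loop is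
--     replaced by its arithmetic sum and the suited/offsuit branches are merged."""
--     c1, c2 = hole_cards
--     r1, s1 = divmod(c1, 4)
--     r2, s2 = divmod(c2, 4)
--     if r1 < r2:
--         r1, r2, s1, s2 = r2, r1, s2, s1
--     if r1 == r2:
--         return r1
--     t = min(r1, 12)
--     idx = 78 - t * (t + 1) // 2 + (r1 - 1 - r2)
--     base = 13 if s1 == s2 else 91
--     return min(base + idx, 168)
-- ===== Notes on version B (the rewrite author's own statement) =====
-- stated objective: simpler
-- what changed: Replaces the legacy countdown loop over range(12, r1, -1) with its closed-form arithmetic sum 78 - t*(t+1)//2 (t clamped to 12) and merges the suited/offsuit branches into one expression with a 13/91 base.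
import Mathlib
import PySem

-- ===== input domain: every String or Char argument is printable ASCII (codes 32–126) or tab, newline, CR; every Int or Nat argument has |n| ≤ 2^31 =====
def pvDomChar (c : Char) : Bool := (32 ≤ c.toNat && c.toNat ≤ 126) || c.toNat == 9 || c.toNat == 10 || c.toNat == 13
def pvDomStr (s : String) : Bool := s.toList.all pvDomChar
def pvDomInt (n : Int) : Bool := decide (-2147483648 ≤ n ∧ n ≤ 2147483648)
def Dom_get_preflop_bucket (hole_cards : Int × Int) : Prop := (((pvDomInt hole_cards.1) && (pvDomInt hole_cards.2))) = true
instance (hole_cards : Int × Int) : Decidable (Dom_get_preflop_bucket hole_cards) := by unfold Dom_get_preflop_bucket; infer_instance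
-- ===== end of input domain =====

-- B replaces A's legacy countdown loop by its closed-form arithmetic sum and merges the
-- suited/offsuit branches into one expression with a 13/91 base (objective: simpler).

-- ===== PORT A =====
-- rank-normalized core of A (r1 ≥ r2 after the swap in get_preflop_bucket)
def pvA_core (r1 r2 s1 s2 : Int) : Int :=
  let is_suited := s1 == s2
  if r1 == r2 then
    r1
  else if is_suited then
    let idx := (PySem.List.pyRange 12 r1 (-1)).foldl (fun idx hi => idx + hi) 13
    let idx := idx + (r1 - 1 - r2)
    min idx 168
  else
    let idx := (PySem.List.pyRange 12 r1 (-1)).foldl (fun idx hi => idx + hi) (13 + 78)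
    let idx := idx + (r1 - 1 - r2)
    min idx 168

def get_preflop_bucket (hole_cards : Int × Int) : Int :=
  let c1 := hole_cards.1
  let c2 := hole_cards.2
  let r1 := PySem.Int.floordiv c1 4
  let s1 := PySem.Int.mod c1 4
  let r2 := PySem.Int.floordiv c2 4
  let s2 := PySem.Int.mod c2 4
  if r1 < r2 then pvA_core r2 r1 s2 s1 else pvA_core r1 r2 s1 s2

-- ===== PORT B =====
-- rank-normalized core of B (closed form, no loop)
def pvB_core (r1 r2 s1 s2 : Int) : Int :=
  if r1 == r2 then
    r1
  else
    let t := min r1 12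
    let idx := 78 - PySem.Int.floordiv (t * (t + 1)) 2 + (r1 - 1 - r2)
    let base : Int := if s1 == s2 then 13 else 91
    min (base + idx) 168

def get_preflop_bucket_alt (hole_cards : Int × Int) : Int :=
  let c1 := hole_cards.1
  let c2 := hole_cards.2
  let r1 := PySem.Int.floordiv c1 4
  let s1 := PySem.Int.mod c1 4
  let r2 := PySem.Int.floordiv c2 4
  let s2 := PySem.Int.mod c2 4
  if r1 < r2 then pvB_core r2 r1 s2 s1 else pvB_core r1 r2 s1 s2

-- ===== PRECONDITION & SPEC =====
def Spec_get_preflop_bucket (hole_cards : Int × Int) (out : Int) : Prop := out = get_preflop_bucket_alt hole_cards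
instance (hole_cards : Int × Int) (out : Int) : Decidable (Spec_get_preflop_bucket hole_cards out) := by unfold Spec_get_preflop_bucket; infer_instance

-- ===== CLAIM (what is proved, stated in full; the proofs are below) =====
def Claim_equal_get_preflop_bucket : Prop := ∀ (hole_cards : Int × Int), Dom_get_preflop_bucket hole_cards → Spec_get_preflop_bucket hole_cards (get_preflop_bucket hole_cards)

-- ===== LEMMAS AND PROOFS =====

-- sum of the ascending range 13-n .. 12, doubled (closed form without division)
lemma pv_asc_sum (n : Nat) :
    2 * (PySem.List.pyRange (13 - (n : Int)) 13 1).sum = (n : Int) * (25 - (n : Int)) := by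
  induction n with
  | zero => simp [PySem.List.pyRange_one_eq_nil]
  | succ n ih =>
    rw [PySem.List.pyRange_one_cons (by push_cast; omega)]
    have h : (13 - ((n : Int) + 1)) + 1 = 13 - (n : Int) := by ring
    push_cast
    push_cast at ih
    rw [h, List.sum_cons]
    nlinarith [ih]

-- the countdown loop's total: sum of range(12, r, -1)
lemma pv_sum_countdown (r : Int) :
    (PySem.List.pyRange 12 r (-1)).sum =
      78 - PySem.Int.floordiv (min r 12 * (min r 12 + 1)) 2 := by
  by_cases h : 12 ≤ r
  · rw [PySem.List.pyRange_neg_one_eq_nil h, min_eq_right h]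
    decide
  · rw [min_eq_left (by omega), PySem.List.pyRange_neg_one_eq_reverse, List.sum_reverse]
    have h13' : (12 : Int) + 1 = 13 := by norm_num
    rw [h13']
    have hd : PySem.Int.floordiv (r * (r + 1)) 2 * 2 = r * (r + 1) := by
      have hm : PySem.Int.mod (r * (r + 1)) 2 = 0 :=
        (PySem.Int.mod_eq_zero_iff_dvd _ _).mpr (Int.even_mul_succ_self r).two_dvd
      have := PySem.Int.floordiv_mul_add_mod (r * (r + 1)) 2
      omega
    have hn : ((12 - r).toNat : Int) = 12 - r := by omega
    have hs := pv_asc_sum (12 - r).toNat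
    rw [hn] at hs
    have h13 : (13 : Int) - (12 - r) = r + 1 := by ring
    rw [h13] at hs
    nlinarith [hs, hd]

lemma pv_core_eq (r1 r2 s1 s2 : Int) : pvA_core r1 r2 s1 s2 = pvB_core r1 r2 s1 s2 := by
  unfold pvA_core pvB_core
  by_cases h12 : r1 = r2
  · simp [h12]
  · have hf : ∀ init : Int,
        List.foldl (fun idx hi => idx + hi) init (PySem.List.pyRange 12 r1 (-1)) =
          init + (78 - PySem.Int.floordiv (min r1 12 * (min r1 12 + 1)) 2) := by
      intro init
      rw [← pv_sum_countdown r1]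
      simpa using PySem.List.foldl_add (PySem.List.pyRange 12 r1 (-1)) (fun x => x) init
    simp only [beq_iff_eq, h12, if_false]
    by_cases hsu : s1 = s2
    · simp only [hsu, if_true]
      rw [hf]; congr 1; ring
    · simp only [hsu, if_false]
      rw [hf]; congr 1; ring

-- ===== VERDICT (by name: the statement is the Claim_ definition above) =====
theorem get_preflop_bucket_spec : Claim_equal_get_preflop_bucket := by
  intro hc _
  unfold Spec_get_preflop_bucket get_preflop_bucket get_preflop_bucket_alt
  simp only [pv_core_eq]
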